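-- pv_equiv track=rewrite | github.com/lhgiang040504/AI | Python_Assignment/Part7_Itertools/itertoolls.py | group_BySimilar1
-- ===== SOURCE A (Python) =====
-- def group_BySimilar1(lst):
--     # Create a dictionary to store the groups
--     groups = {}
--
--     # Group items by last name
--     for element in lst:
--         lastName = element.split()[-1]
--         if lastName not in groups:
--             groups[lastName] = []
--         groups[lastName].append(element)
--
--     return groups
-- ===== SOURCE B (Python) =====
-- def group_BySimilar1(lst):
--     # Dict-free staged grouping: compute the key list once, dedup it in
--     # first-occurrence order, then build each group by filtering the zipped
--     # (element, key) list -- no incremental dict, no membership test per element.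
--     keys = [e.split()[-1] for e in lst]
--     return {k: [e for e, ke in zip(lst, keys) if ke == k]
--             for k in dict.fromkeys(keys)}
-- ===== Notes on version B (the rewrite author's own statement) =====
-- stated objective: simpler
-- what changed: A builds the dict incrementally in one pass, testing membership and appending into on-demand buckets; B never builds a dict incrementally: it computes the key list once, dedups it in first-occurrence order, and builds each group by filtering the zipped (element,key) list per distinct key -- shorter and plainer, at the cost of O(n*k) repeated scans instead of O(n) hashing.
import Mathlib
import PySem

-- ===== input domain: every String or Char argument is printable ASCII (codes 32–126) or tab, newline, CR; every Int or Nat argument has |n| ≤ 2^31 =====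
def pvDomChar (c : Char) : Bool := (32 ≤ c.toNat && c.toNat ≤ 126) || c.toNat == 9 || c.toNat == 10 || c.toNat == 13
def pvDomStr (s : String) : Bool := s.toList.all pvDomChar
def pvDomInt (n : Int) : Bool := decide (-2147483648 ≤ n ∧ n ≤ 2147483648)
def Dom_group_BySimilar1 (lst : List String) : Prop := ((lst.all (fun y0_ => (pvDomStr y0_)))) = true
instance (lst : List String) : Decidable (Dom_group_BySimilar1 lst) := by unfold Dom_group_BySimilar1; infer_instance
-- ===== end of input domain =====

-- B replaces A's incremental dict (membership test + on-demand bucket + append)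
-- by a dict-free staged construction: dedup the ordered key list, then collect
-- each group by filtering the zipped (element, key) list. Objective: alternative.

-- element.split()[-1]; the .getD "" is never reached under Pre_ (split nonempty)
def pvLastWord (element : String) : String :=
  ((PySem.List.pyGet? (PySem.Str.split₀ element) (-1)).getD "")

-- ===== PORT A =====
def group_BySimilar1 (lst : List String) : List (String × List String) :=
  (lst.foldl
    (fun (groups : PySem.Dict String (List String)) element =>
      let lastName := pvLastWord element
      let groups := if groups.contains lastName then groups else groups.insert lastName []
      groups.modify lastName [] (fun v => v ++ [element]))
    PySem.Dict.empty).items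

-- ===== PORT B =====
def group_BySimilar1_alt (lst : List String) : List (String × List String) :=
  let keys := lst.map (fun e => pvLastWord e)
  (PySem.List.dedup keys).map (fun k =>
    (k, ((lst.zip keys).filter (fun p => p.2 == k)).map (fun p => p.1)))

-- ===== PRECONDITION & SPEC =====
-- Pre_ excludes exactly the inputs containing an empty/whitespace-only element, on which
-- Python A (and Python B alike) raise IndexError at element.split()[-1].
def Pre_group_BySimilar1 (lst : List String) : Prop :=
  ∀ s ∈ lst, PySem.Str.split₀ s ≠ []
instance (lst : List String) : Decidable (Pre_group_BySimilar1 lst) := by unfold Pre_group_BySimilar1; infer_instance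

def pvWitness_group_BySimilar1 : List String := ["john smith", "jane smith", "bob doe"]

def Spec_group_BySimilar1 (lst : List String) (out : List (String × List String)) : Prop := out = group_BySimilar1_alt lst
instance (lst : List String) (out : List (String × List String)) : Decidable (Spec_group_BySimilar1 lst out) := by unfold Spec_group_BySimilar1; infer_instance

-- ===== CLAIM (what is proved, stated in full; the proofs are below) =====
def Claim_equal_group_BySimilar1 : Prop := ∀ (lst : List String), Dom_group_BySimilar1 lst → Pre_group_BySimilar1 lst → Spec_group_BySimilar1 lst (group_BySimilar1 lst)

-- ===== LEMMAS AND PROOFS =====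

-- A's step (create-bucket-if-absent, then append) IS Dict.modify with default [].
theorem pvStep_eq_modify (d : PySem.Dict String (List String)) (e : String) :
    (let lastName := pvLastWord e
     let d' := if d.contains lastName then d else d.insert lastName []
     d'.modify lastName [] (fun v => v ++ [e]))
    = d.modify (pvLastWord e) [] (fun v => v ++ [e]) := by
  by_cases h : d.contains (pvLastWord e) = true
  · simp [h]
  · simp only [Bool.not_eq_true] at h
    simp only [h, Bool.false_eq_true, if_false]
    rw [PySem.Dict.modify, PySem.Dict.modify, PySem.Dict.getD_insert_self,
        PySem.Dict.insert_insert_self, PySem.Dict.getD_of_not_contains d [] h]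

-- ===== VERDICT (by name: the statement is the Claim_ definition above) =====
theorem group_BySimilar1_spec : Claim_equal_group_BySimilar1 := by
  intro lst _ _
  unfold Spec_group_BySimilar1 group_BySimilar1 group_BySimilar1_alt
  have hstep : (fun (groups : PySem.Dict String (List String)) element =>
      let lastName := pvLastWord element
      let groups := if groups.contains lastName then groups else groups.insert lastName []
      groups.modify lastName [] (fun v => v ++ [element]))
      = fun d e => PySem.Dict.modify d (pvLastWord e) [] (fun v => v ++ [e]) := by
    funext d e; exact pvStep_eq_modify d e
  rw [hstep]
  simp only []
  -- A's fold over lst is the pair fold over keyed element/key pairs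
  set keyed := lst.map (fun e => (pvLastWord e, e)) with hkeyed
  have hK : keyed.map (fun p => p.1) = lst.map (fun e => pvLastWord e) := by
    simp [hkeyed, List.map_map, Function.comp_def]
  set dA := lst.foldl (fun d e => PySem.Dict.modify d (pvLastWord e) [] (fun v => v ++ [e]))
      PySem.Dict.empty with hdA
  have hA : dA = keyed.foldl (fun d p => PySem.Dict.modify d p.1 [] (fun v => v ++ [p.2]))
      PySem.Dict.empty := by
    rw [hdA, hkeyed, List.foldl_map]
  have hkA : dA.keys = PySem.List.dedup (lst.map (fun e => pvLastWord e)) := by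
    rw [hA, PySem.Dict.keys_foldl_modify_key]
    simp [PySem.Dict.keys_empty, PySem.Set.update, PySem.List.dedup_eq_ofList,
      PySem.Set.ofList_eq_foldl, hK]
  have hndA : dA.keys.Nodup := by
    rw [hA]; exact PySem.Dict.nodup_keys_foldl_modify_key keyed (fun p => p.1) [] _ _ (by simp)
  -- what each bucket holds
  have hget : ∀ c, dA.getD c [] =
      ((lst.zip (lst.map (fun e => pvLastWord e))).filter (fun p => p.2 == c)).map
        (fun p => p.1) := by
    intro c
    rw [hA, PySem.Dict.getD_foldl_modify_append, PySem.Dict.getD_empty]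
    have hz : lst.zip (lst.map (fun e => pvLastWord e))
        = lst.map (fun e => (e, pvLastWord e)) := by
      simpa using List.zip_map' (f := (id : String → String)) (g := fun e => pvLastWord e) (l := lst)
    rw [hz, hkeyed]
    simp [List.filter_map, List.map_map, Function.comp_def]
  rw [PySem.Dict.items_eq_map_keys dA hndA [], hkA]
  exact List.map_congr_left (fun k _ => by rw [hget k])
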